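-- pv_equiv track=rewrite | github.com/soyukke/lean-unsolved | scripts/collatz_tao_syracuse_rv_correlation.py | collect_v2_data
-- ===== SOURCE A (Python) =====
-- def v2(n):
--     """2-adic valuation of n"""
--     if n == 0:
--         return 999
--     c = 0
--     while n % 2 == 0:
--         n //= 2
--         c += 1
--     return c
--
-- def syracuse(n):
--     """Syracuse map: Syr(n) = (3n+1)/2^{v2(3n+1)} for odd n"""
--     val = 3 * n + 1
--     while val % 2 == 0:
--         val //= 2
--     return val
--
-- def v2_of_3n1(n):
--     """v2(3n+1) for odd n"""
--     return v2(3 * n + 1)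
--
-- def get_v2_sequence(n, length):
--     """奇数 n から length 回の Syracuse ステップの v2 系列を取得"""
--     seq = []
--     current = n
--     for _ in range(length):
--         if current <= 0:
--             break
--         val = v2_of_3n1(current)
--         seq.append(val)
--         current = syracuse(current)
--         if current == 1:
--             break
--     return seq
--
-- def collect_v2_data(N_max, seq_len):
--     """多数の奇数初期値からv2系列を収集"""
--     all_sequences = []
--     all_v2_values = []
--     for n in range(3, N_max + 1, 2):
--         seq = get_v2_sequence(n, seq_len)
--         if len(seq) >= seq_len:
--             all_sequences.append(seq)
--             all_v2_values.extend(seq)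
--     return all_sequences, all_v2_values
-- ===== SOURCE B (Python) =====
-- def _advance(state):
--     """One synchronized Syracuse step on a (seq, current) state; current is None
--     once the trajectory has reached 1. v2 is taken in closed form via the
--     lowbit bit trick instead of a division loop."""
--     seq, cur = state
--     if cur is None:
--         return state
--     val = 3 * cur + 1
--     v = (val & -val).bit_length() - 1
--     seq.append(v)
--     new = val >> v
--     return (seq, None if new == 1 else new)
--
--
-- def collect_v2_data(N_max, seq_len):
--     """Column-wise collection: advance ALL odd starts one Syracuse step at a
--     time (synchronized rounds over the whole population, stopping early once
--     every trajectory has finished), then filter the full-length sequences and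
--     flatten once at the end."""
--     states = [([], n) for n in range(3, N_max + 1, 2)]
--     for _ in range(max(seq_len, 0)):
--         if all(cur is None for _, cur in states):
--             break
--         states = [_advance(s) for s in states]
--     all_sequences = [seq for seq, _ in states if len(seq) >= seq_len]
--     return all_sequences, [v for s in all_sequences for v in s]
-- ===== Notes on version B (the rewrite author's own statement) =====
-- stated objective: alternative
-- what changed: B traverses the work column-wise: instead of running each odd start's whole trajectory to completion in an inner loop, it keeps one (sequence, current) state per start and advances the entire population one Syracuse step per round for seq_len synchronized rounds (finished trajectories marked None), taking each 2-adic valuation in closed form with the lowbit bit trick rather than A's two division-by-2 loops, then filters the full-length sequences and flattens once at the end.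
import Mathlib
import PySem

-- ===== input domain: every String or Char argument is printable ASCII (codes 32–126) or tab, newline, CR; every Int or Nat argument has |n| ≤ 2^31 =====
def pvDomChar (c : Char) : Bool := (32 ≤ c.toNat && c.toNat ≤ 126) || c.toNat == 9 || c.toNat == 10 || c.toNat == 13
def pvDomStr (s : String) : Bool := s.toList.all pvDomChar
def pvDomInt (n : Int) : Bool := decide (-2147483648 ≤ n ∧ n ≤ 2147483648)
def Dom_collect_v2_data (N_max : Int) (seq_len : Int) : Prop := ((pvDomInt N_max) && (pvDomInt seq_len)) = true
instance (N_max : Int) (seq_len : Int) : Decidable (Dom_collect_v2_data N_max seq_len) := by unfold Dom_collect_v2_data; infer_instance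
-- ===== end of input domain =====

-- B replaces A's per-start trajectory loops by a column-wise sweep: all odd starts
-- are advanced one Syracuse step at a time in seq_len synchronized rounds over a
-- list of (sequence, current) states, each step taking v2 in closed form by the
-- lowbit bit trick; full-length sequences are filtered and flattened once at the end.

-- ===== PORT A =====
-- while n % 2 == 0: n //= 2; c += 1   (the 'n ≠ 0' conjunct is a totality guard:
-- Python loops forever at n = 0, which the callers below never reach)
def pvV2Loop (n : Int) (c : Int) : Int :=
  if h : PySem.Int.mod n 2 = 0 ∧ n ≠ 0 then pvV2Loop (PySem.Int.floordiv n 2) (c + 1) else c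
termination_by n.natAbs
decreasing_by
  rw [PySem.Int.floordiv_eq_ediv_of_pos (by omega)]
  rw [PySem.Int.mod_eq_emod_of_pos (by omega)] at h
  omega

def pvV2 (n : Int) : Int := if n = 0 then 999 else pvV2Loop n 0

-- while val % 2 == 0: val //= 2   (same totality guard, same unreachable case)
def pvSyrLoop (val : Int) : Int :=
  if h : PySem.Int.mod val 2 = 0 ∧ val ≠ 0 then pvSyrLoop (PySem.Int.floordiv val 2) else val
termination_by val.natAbs
decreasing_by
  rw [PySem.Int.floordiv_eq_ediv_of_pos (by omega)]
  rw [PySem.Int.mod_eq_emod_of_pos (by omega)] at h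
  omega

def pvSyracuse (n : Int) : Int := pvSyrLoop (3 * n + 1)

def pvV2Of3n1 (n : Int) : Int := pvV2 (3 * n + 1)

-- for _ in range(length): … (fuel = the remaining iteration count, seq = the accumulator)
def pvGetSeqA : Nat → Int → List Int → List Int
  | 0, _, seq => seq
  | fuel + 1, current, seq =>
    if current ≤ 0 then seq
    else
      let val := pvV2Of3n1 current
      let seq' := seq ++ [val]
      let current' := pvSyracuse current
      if current' = 1 then seq' else pvGetSeqA fuel current' seq'

def pvGetV2Sequence (n : Int) (length : Int) : List Int := pvGetSeqA length.toNat n []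

def collect_v2_data (N_max : Int) (seq_len : Int) : List (List Int) × List Int :=
  (PySem.List.pyRange 3 (N_max + 1) 2).foldl
    (fun (st : List (List Int) × List Int) n =>
      let seq := pvGetV2Sequence n seq_len
      if seq_len ≤ PySem.List.len seq then (st.1 ++ [seq], st.2 ++ seq) else st)
    ([], [])

-- ===== PORT B =====
-- _advance of Source B: one synchronized step on one (seq, current) state; 'val >> v'
-- is ported as 'val >>> v.toNat', exact since v = bit_length - 1 ≥ 0 where reached
def pvAdvance (st : List Int × Option Int) : List Int × Option Int :=
  match st with
  | (seq, none) => (seq, none)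
  | (seq, some cur) =>
    let val := 3 * cur + 1
    let v : Int := (PySem.Int.bitLength (PySem.Int.band val (-val)) : Int) - 1
    let nw := val >>> v.toNat
    (seq ++ [v], if nw = 1 then none else some nw)

-- 'for _ in range(max(seq_len, 0)): if all(...): break; states = [_advance(s) for s in states]'
-- (fuel = remaining rounds)
def pvRounds : Nat → List (List Int × Option Int) → List (List Int × Option Int)
  | 0, sts => sts
  | t + 1, sts =>
    if sts.all (fun s => s.2.isNone) then sts else pvRounds t (sts.map pvAdvance)

def collect_v2_data_alt (N_max : Int) (seq_len : Int) : List (List Int) × List Int :=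
  let states0 := (PySem.List.pyRange 3 (N_max + 1) 2).map (fun n => (([] : List Int), some n))
  let states := pvRounds (max seq_len 0).toNat states0
  let all_sequences := (states.filter (fun s => decide (seq_len ≤ PySem.List.len s.1))).map (fun s => s.1)
  (all_sequences, all_sequences.flatMap (fun s => s))

-- ===== PRECONDITION & SPEC =====
def Spec_collect_v2_data (N_max : Int) (seq_len : Int) (out : List (List Int) × List Int) : Prop := out = collect_v2_data_alt N_max seq_len
instance (N_max : Int) (seq_len : Int) (out : List (List Int) × List Int) : Decidable (Spec_collect_v2_data N_max seq_len out) := by unfold Spec_collect_v2_data; infer_instance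

-- ===== CLAIM (what is proved, stated in full; the proofs are below) =====
def Claim_equal_collect_v2_data : Prop := ∀ (N_max : Int) (seq_len : Int), Dom_collect_v2_data N_max seq_len → Spec_collect_v2_data N_max seq_len (collect_v2_data N_max seq_len)

-- ===== LEMMAS AND PROOFS =====

-- bit-level facts used to evaluate the lowbit trick
theorem pv_and_odd_even (j : Nat) : (2 * j + 1) &&& (2 * j) = 2 * j := by
  apply Nat.eq_of_testBit_eq
  intro i
  rw [Nat.testBit_and]
  cases i with
  | zero =>
      simp only [Nat.testBit_zero]
      have h1 : (2 * j + 1) % 2 = 1 := by omega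
      have h2 : (2 * j) % 2 = 0 := by omega
      simp [h1, h2]
  | succ i =>
      have h1 : (2 * j + 1) / 2 = j := by omega
      have h2 : (2 * j) / 2 = j := by omega
      simp only [Nat.testBit_add_one, h1, h2]
      cases j.testBit i <;> rfl

theorem pv_and_even_odd (a b : Nat) : (2 * a) &&& (2 * b + 1) = 2 * (a &&& b) := by
  apply Nat.eq_of_testBit_eq
  intro i
  rw [Nat.testBit_and]
  cases i with
  | zero =>
      simp only [Nat.testBit_zero]
      have h1 : (2 * a) % 2 = 0 := by omega
      have h2 : (2 * (a &&& b)) % 2 = 0 := by omega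
      simp [h1, h2]
  | succ i =>
      have h1 : (2 * a) / 2 = a := by omega
      have h2 : (2 * b + 1) / 2 = b := by omega
      have h3 : (2 * (a &&& b)) / 2 = a &&& b := by omega
      simp only [Nat.testBit_add_one, h1, h2, h3, Nat.testBit_and]

-- m - (m &&& (m-1)) is the lowest set bit of m
theorem pv_lowbit (k o : Nat) (ho : o % 2 = 1) :
    2 ^ k * o - (2 ^ k * o &&& (2 ^ k * o - 1)) = 2 ^ k := by
  induction k with
  | zero =>
      obtain ⟨j, rfl⟩ : ∃ j, o = 2 * j + 1 := ⟨o / 2, by omega⟩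
      simp [pv_and_odd_even]
  | succ k ih =>
      have hw : 0 < 2 ^ k * o := Nat.mul_pos (pow_pos (by omega) _) (by omega)
      have h1 : 2 ^ (k + 1) * o = 2 * (2 ^ k * o) := by ring
      have hle : (2 ^ k * o) &&& (2 ^ k * o - 1) ≤ 2 ^ k * o := Nat.and_le_left
      rw [h1]
      have h2 : 2 * (2 ^ k * o) - 1 = 2 * (2 ^ k * o - 1) + 1 := by omega
      rw [h2, pv_and_even_odd]
      have hp : 2 ^ (k + 1) = 2 * 2 ^ k := by ring
      omega

-- PySem.Int.band m (-m) is m's lowest set bit, for positive natural m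
theorem pv_band_neg (m : Nat) (hm : 0 < m) :
    PySem.Int.band (m : Int) (-(m : Int)) = ((m - (m &&& (m - 1)) : Nat) : Int) := by
  have h1 : ¬ (0 : Int) ≤ -(m : Int) := by omega
  have h2 : (-(-(m : Int)) - 1).toNat = m - 1 := by omega
  simp only [PySem.Int.band, if_pos (by positivity : (0:Int) ≤ (m:Int)), if_neg h1, h2,
    Int.toNat_natCast]

theorem pv_bitLength_pow (k : Nat) : PySem.Int.bitLength ((2 ^ k : Nat) : Int) = k + 1 := by
  induction k with
  | zero => decide
  | succ k ih =>
      rw [PySem.Int.bitLength_natCast (pow_pos (by omega) _)]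
      have h : 2 ^ (k + 1) / 2 = 2 ^ k := by
        rw [pow_succ]; omega
      rw [h, ih]

theorem pv_shift_pow (k o : Nat) : (((2 ^ k * o : Nat) : Int)) >>> k = ((o : Nat) : Int) := by
  have h1 : ((2 ^ k * o : Nat) : Int) >>> k = (((2 ^ k * o) >>> k : Nat) : Int) := rfl
  have h2 : (2 ^ k * o) >>> k = o := by
    rw [Nat.shiftRight_eq_div_pow, Nat.mul_div_cancel_left _ (pow_pos (by omega) _)]
  rw [h1, h2]

theorem pv_v2loop_pow (k o : Nat) (ho : o % 2 = 1) :
    ∀ c, pvV2Loop ((2 ^ k * o : Nat) : Int) c = c + k := by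
  induction k with
  | zero =>
      intro c
      rw [pvV2Loop, dif_neg]
      · simp
      · rw [show ((2 ^ 0 * o : Nat) : Int) = ((o : Nat) : Int) by norm_num]
        rw [show (PySem.Int.mod ((o : Nat) : Int) 2) = ((o % 2 : Nat) : Int) from by exact_mod_cast PySem.Int.mod_natCast o 2]
        omega
  | succ k ih =>
      intro c
      have h1 : 2 ^ (k + 1) * o = 2 * (2 ^ k * o) := by ring
      have hmod : PySem.Int.mod ((2 ^ (k + 1) * o : Nat) : Int) 2 = 0 := by
        rw [show (PySem.Int.mod ((2 ^ (k + 1) * o : Nat) : Int) 2) = (((2 ^ (k + 1) * o) % 2 : Nat) : Int) from by exact_mod_cast PySem.Int.mod_natCast _ 2]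
        rw [h1, Nat.mul_mod_right]
        rfl
      have hne : ((2 ^ (k + 1) * o : Nat) : Int) ≠ 0 := by
        have : 0 < 2 ^ (k + 1) * o := Nat.mul_pos (pow_pos (by omega) _) (by omega)
        omega
      rw [pvV2Loop, dif_pos ⟨hmod, hne⟩]
      have hdiv : PySem.Int.floordiv ((2 ^ (k + 1) * o : Nat) : Int) 2 = ((2 ^ k * o : Nat) : Int) := by
        rw [show (PySem.Int.floordiv ((2 ^ (k + 1) * o : Nat) : Int) 2) = (((2 ^ (k + 1) * o) / 2 : Nat) : Int) from by exact_mod_cast PySem.Int.floordiv_natCast _ 2]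
        rw [h1, Nat.mul_div_cancel_left _ (by omega)]
      rw [hdiv, ih]
      push_cast
      ring

theorem pv_syrloop_pow (k o : Nat) (ho : o % 2 = 1) :
    pvSyrLoop ((2 ^ k * o : Nat) : Int) = ((o : Nat) : Int) := by
  induction k with
  | zero =>
      rw [pvSyrLoop, dif_neg]
      · norm_num
      · rw [show ((2 ^ 0 * o : Nat) : Int) = ((o : Nat) : Int) by norm_num]
        rw [show (PySem.Int.mod ((o : Nat) : Int) 2) = ((o % 2 : Nat) : Int) from by exact_mod_cast PySem.Int.mod_natCast o 2]
        omega
  | succ k ih =>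
      have h1 : 2 ^ (k + 1) * o = 2 * (2 ^ k * o) := by ring
      have hmod : PySem.Int.mod ((2 ^ (k + 1) * o : Nat) : Int) 2 = 0 := by
        rw [show (PySem.Int.mod ((2 ^ (k + 1) * o : Nat) : Int) 2) = (((2 ^ (k + 1) * o) % 2 : Nat) : Int) from by exact_mod_cast PySem.Int.mod_natCast _ 2]
        rw [h1, Nat.mul_mod_right]
        rfl
      have hne : ((2 ^ (k + 1) * o : Nat) : Int) ≠ 0 := by
        have : 0 < 2 ^ (k + 1) * o := Nat.mul_pos (pow_pos (by omega) _) (by omega)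
        omega
      rw [pvSyrLoop, dif_pos ⟨hmod, hne⟩]
      have hdiv : PySem.Int.floordiv ((2 ^ (k + 1) * o : Nat) : Int) 2 = ((2 ^ k * o : Nat) : Int) := by
        rw [show (PySem.Int.floordiv ((2 ^ (k + 1) * o : Nat) : Int) 2) = (((2 ^ (k + 1) * o) / 2 : Nat) : Int) from by exact_mod_cast PySem.Int.floordiv_natCast _ 2]
        rw [h1, Nat.mul_div_cancel_left _ (by omega)]
      rw [hdiv, ih]

-- the fused bit-trick step of B computes exactly A's (v2, Syracuse) pair on positive input
theorem pv_step_eq (val : Int) (h : 0 < val) :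
    pvV2 val = (PySem.Int.bitLength (PySem.Int.band val (-val)) : Int) - 1 ∧
    pvSyrLoop val = val >>> ((PySem.Int.bitLength (PySem.Int.band val (-val)) : Int) - 1).toNat := by
  obtain ⟨m, rfl, hm⟩ : ∃ m : Nat, val = (m : Int) ∧ 0 < m :=
    ⟨val.toNat, by omega, by omega⟩
  obtain ⟨k, o, hdvd, hmo⟩ := Nat.exists_eq_pow_mul_and_not_dvd (by omega : m ≠ 0) 2 (by omega)
  have ho : o % 2 = 1 := by omega
  subst hmo
  have hband : PySem.Int.band ((2 ^ k * o : Nat) : Int) (-((2 ^ k * o : Nat) : Int)) = ((2 ^ k : Nat) : Int) := by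
    rw [pv_band_neg _ hm, pv_lowbit k o ho]
  rw [hband, pv_bitLength_pow]
  have hv : ((k + 1 : Nat) : Int) - 1 = (k : Int) := by omega
  have hvt : (((k + 1 : Nat) : Int) - 1).toNat = k := by omega
  constructor
  · rw [pvV2, if_neg (by omega), pv_v2loop_pow k o ho 0, hv]
    omega
  · rw [hvt, pv_shift_pow k o, pv_syrloop_pow k o ho]

-- A's per-step odd part stays positive
theorem pv_syrloop_pos (val : Int) (h : 0 < val) : 0 < pvSyrLoop val := by
  obtain ⟨m, rfl, hm⟩ : ∃ m : Nat, val = (m : Int) ∧ 0 < m :=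
    ⟨val.toNat, by omega, by omega⟩
  obtain ⟨k, o, hdvd, hmo⟩ := Nat.exists_eq_pow_mul_and_not_dvd (by omega : m ≠ 0) 2 (by omega)
  have ho : o % 2 = 1 := by omega
  subst hmo
  rw [pv_syrloop_pow k o ho]
  omega

-- B's t synchronized rounds leave a finished state untouched
theorem pv_iterate_none (t : Nat) (seq : List Int) :
    pvAdvance^[t] (seq, none) = (seq, none) := by
  induction t with
  | zero => rfl
  | succ t ih => rw [Function.iterate_succ_apply, pvAdvance, ih]

-- column-wise: B's t rounds on one live state produce exactly A's t-fuel trajectory sequence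
theorem pv_iterate_eq_seqA : ∀ (t : Nat) (cur : Int), 0 < cur → ∀ (seq : List Int),
    (pvAdvance^[t] (seq, some cur)).1 = pvGetSeqA t cur seq := by
  intro t
  induction t with
  | zero => intro cur _ seq; rfl
  | succ t ih =>
      intro cur hc seq
      have hval : 0 < 3 * cur + 1 := by omega
      obtain ⟨h1, h2⟩ := pv_step_eq (3 * cur + 1) hval
      rw [Function.iterate_succ_apply]
      simp only [pvAdvance]
      rw [← h2, ← h1, pvGetSeqA]
      by_cases hone : pvSyrLoop (3 * cur + 1) = 1
      · simp only [pvV2Of3n1, pvSyracuse, if_neg (show ¬ cur ≤ 0 by omega), if_pos hone,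
          pv_iterate_none]
      · have hpos : 0 < pvSyrLoop (3 * cur + 1) := pv_syrloop_pos _ hval
        simp only [pvV2Of3n1, pvSyracuse, if_neg (show ¬ cur ≤ 0 by omega), if_neg hone]
        exact ih _ hpos _

-- B's rounds loop (with its all-finished early break) = mapping the t-fold iterate:
-- the break fires only when every state is finished, where pvAdvance is the identity
theorem pv_rounds_eq_map_iterate : ∀ (t : Nat) (sts : List (List Int × Option Int)),
    pvRounds t sts = sts.map pvAdvance^[t] := by
  intro t
  induction t with
  | zero => intro sts; simp [pvRounds]
  | succ t ih =>
      intro sts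
      rw [pvRounds]
      by_cases hall : sts.all (fun s => s.2.isNone)
      · rw [if_pos hall]
        symm
        have hid : ∀ s ∈ sts, pvAdvance^[t + 1] s = id s := by
          intro s hs
          have h2 := List.all_eq_true.mp hall s hs
          obtain ⟨seq, o⟩ := s
          have : o = none := by simpa [Option.isNone_iff_eq_none] using h2
          subst this
          exact pv_iterate_none (t + 1) seq
        rw [List.map_congr_left hid, List.map_id]
      · rw [if_neg hall, ih, List.map_map, ← Function.iterate_succ pvAdvance t]

-- A's paired fold = (kept sequences, their concatenation)
theorem pv_fold_pair (g : Int → List Int) (p : Int → Prop) [DecidablePred p] :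
    ∀ (l : List Int) (s : List (List Int)) (v : List Int),
      l.foldl (fun (st : List (List Int) × List Int) n =>
          if p n then (st.1 ++ [g n], st.2 ++ g n) else st) (s, v)
      = (s ++ (l.filter (fun n => decide (p n))).map g,
         v ++ ((l.filter (fun n => decide (p n))).map g).flatMap (fun s => s)) := by
  intro l
  induction l with
  | nil => intro s v; simp
  | cons n l ih =>
      intro s v
      simp only [List.foldl_cons, List.filter_cons]
      by_cases hp : p n
      · simp [hp, ih, List.append_assoc]
      · simp [hp, ih]

-- ===== VERDICT (by name: the statement is the Claim_ definition above) =====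
theorem collect_v2_data_spec : Claim_equal_collect_v2_data := by
  intro N_max seq_len _
  show collect_v2_data N_max seq_len = collect_v2_data_alt N_max seq_len
  rw [collect_v2_data, collect_v2_data_alt]
  simp only [pv_rounds_eq_map_iterate]
  set l := PySem.List.pyRange 3 (N_max + 1) 2 with hl
  have hTnat : (max seq_len 0).toNat = seq_len.toNat := by omega
  -- every start in the range is positive
  have hmem : ∀ n ∈ l, (0 : Int) < n := by
    intro n hn
    rw [hl, PySem.List.mem_pyRange_iff_of_pos (by omega)] at hn
    omega
  -- B's filtered-and-projected states = A's kept sequences, elementwise on l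
  have hB : ((((l.map (fun n => (([] : List Int), some n))).map pvAdvance^[(max seq_len 0).toNat]).filter
        (fun s => decide (seq_len ≤ PySem.List.len s.1))).map (fun s => s.1))
      = (l.filter (fun n => decide (seq_len ≤ PySem.List.len (pvGetV2Sequence n seq_len)))).map
        (fun n => pvGetV2Sequence n seq_len) := by
    rw [List.map_map, List.filter_map, List.map_map]
    have hfix : ∀ n ∈ l,
        (pvAdvance^[(max seq_len 0).toNat] (([] : List Int), some n)).1 = pvGetV2Sequence n seq_len := by
      intro n hn
      rw [hTnat, pv_iterate_eq_seqA seq_len.toNat n (hmem n hn) []]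
      rfl
    have hpred : ∀ n ∈ l,
        ((fun s : List Int × Option Int => decide (seq_len ≤ PySem.List.len s.1)) ∘
          pvAdvance^[(max seq_len 0).toNat] ∘ (fun n : Int => (([] : List Int), some n))) n
        = (fun n => decide (seq_len ≤ PySem.List.len (pvGetV2Sequence n seq_len))) n := by
      intro n hn
      simp only [Function.comp_apply, hfix n hn]
    rw [List.filter_congr hpred]
    apply List.map_congr_left
    intro n hn
    have hn' : n ∈ l := List.mem_of_mem_filter hn
    simp only [Function.comp_apply, hfix n hn']
  rw [pv_fold_pair (fun n => pvGetV2Sequence n seq_len)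
    (fun n => seq_len ≤ PySem.List.len (pvGetV2Sequence n seq_len)) l [] []]
  rw [hB]
  simp only [List.nil_append]
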